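-- pv_equiv track=rewrite | github.com/configflux/weld | weld/query_index.py | candidate_nodes
-- ===== SOURCE A (Python) =====
-- def candidate_nodes(
--     index: dict[str, set[str]],
--     tokens: list[str],
-- ) -> set[str] | None:
--     """Return candidate node IDs that might match all *tokens*.
--
--     For each query token, collects every node ID whose indexed tokens
--     contain the query token as a substring, then intersects across all
--     query tokens.  Returns ``None`` when the index is empty (caller
--     should fall back to a full scan).
--     """
--     if not index:
--         return None
--     candidates: set[str] | None = None
--     for tok in tokens:
--         tok_hits: set[str] = set()
--         for indexed_token, node_ids in index.items():
--             if tok in indexed_token: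
--                 tok_hits |= node_ids
--         if candidates is None:
--             candidates = tok_hits
--         else:
--             candidates &= tok_hits
--         if not candidates:
--             return set()
--     return candidates
-- ===== SOURCE B (Python) =====
-- def candidate_nodes(
--     index: dict[str, set[str]],
--     tokens: list[str],
-- ) -> set[str] | None:
--     # Inverted index: the first token seeds the candidate set from a full scan;
--     # every later token only re-checks the surviving candidates against the
--     # keys that mention them (node -> keys map), instead of rescanning the
--     # whole index per token.
--     if not index:
--         return None
--     if not tokens:
--         return None
--     keys_of: dict[str, list[str]] = {}
--     for key, ids in index.items():
--         for n in ids: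
--             keys_of.setdefault(n, []).append(key)
--     candidates = {n for key, ids in index.items() if tokens[0] in key for n in ids}
--     for tok in tokens[1:]:
--         candidates = {n for n in candidates if any(tok in k for k in keys_of[n])}
--         if not candidates:
--             return candidates
--     return candidates
-- ===== Notes on version B (the rewrite author's own statement) =====
-- stated objective: alternative
-- what changed: B builds an inverted node-id -> keys map once and, after seeding candidates from the first token, filters the surviving candidates per token by checking only the keys that mention each candidate, instead of A's full index rescan and hit-set union per token.
import Mathlib
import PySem

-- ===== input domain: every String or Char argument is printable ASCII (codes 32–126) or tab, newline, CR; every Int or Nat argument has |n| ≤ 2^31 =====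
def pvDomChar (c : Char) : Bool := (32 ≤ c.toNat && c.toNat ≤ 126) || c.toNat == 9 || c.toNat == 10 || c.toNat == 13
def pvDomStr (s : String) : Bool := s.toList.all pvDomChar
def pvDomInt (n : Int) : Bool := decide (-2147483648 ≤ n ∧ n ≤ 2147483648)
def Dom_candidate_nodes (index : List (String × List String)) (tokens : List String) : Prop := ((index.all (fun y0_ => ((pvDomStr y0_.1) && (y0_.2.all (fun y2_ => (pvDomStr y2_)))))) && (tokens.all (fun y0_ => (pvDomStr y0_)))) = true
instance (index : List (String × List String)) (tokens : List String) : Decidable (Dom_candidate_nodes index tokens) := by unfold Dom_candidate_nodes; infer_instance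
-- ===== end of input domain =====

-- B: inverted node->keys map, candidates seeded by the first token and filtered per token via each candidate's own keys (alternative structure, same results).
-- ===== PORT A =====
def hitsFor (items : List (String × List String)) (tok : String) : PySem.Set String :=
  items.foldl (fun hits kv => if PySem.Str.isIn tok kv.1 then PySem.Set.union hits kv.2 else hits)
    PySem.Set.empty

def aLoop (items : List (String × List String)) :
    List String → Option (PySem.Set String) → Option (PySem.Set String)
  | [], cands => cands
  | tok :: rest, cands =>
    let tokHits := hitsFor items tok
    let cands' := match cands with
      | none => tokHits
      | some c => PySem.Set.inter c tokHits
    if cands' = [] then some [] else aLoop items rest (some cands')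

def candidate_nodes (index : List (String × List String)) (tokens : List String) : Option (List String) :=
  if index = [] then none
  else aLoop (PySem.Dict.ofList index).items tokens none

-- ===== PORT B =====
-- keys_of: inverted index node id -> list of keys that mention it
def bKeysOf (items : List (String × List String)) : PySem.Dict String (List String) :=
  items.foldl
    (fun d kv => kv.2.foldl (fun d n => d.modify n [] (fun l => l ++ [kv.1])) d)
    PySem.Dict.empty

def bLoop (keysOf : PySem.Dict String (List String)) :
    List String → PySem.Set String → PySem.Set String
  | [], c => c
  | tok :: rest, c =>
    let c' := c.filter (fun n => (keysOf.getD n []).any (fun k => PySem.Str.isIn tok k))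
    if c' = [] then c' else bLoop keysOf rest c'

def candidate_nodes_alt (index : List (String × List String)) (tokens : List String) : Option (List String) :=
  if index = [] then none
  else
    match tokens with
    | [] => none
    | t0 :: rest =>
      let items := (PySem.Dict.ofList index).items
      let keysOf := bKeysOf items
      let cand0 := items.foldl
        (fun s kv => if PySem.Str.isIn t0 kv.1 then PySem.Set.update s kv.2 else s)
        PySem.Set.empty
      some (bLoop keysOf rest cand0)

-- ===== PRECONDITION & SPEC =====
def Spec_candidate_nodes (index : List (String × List String)) (tokens : List String) (out : Option (List String)) : Prop := out = candidate_nodes_alt index tokens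
instance (index : List (String × List String)) (tokens : List String) (out : Option (List String)) : Decidable (Spec_candidate_nodes index tokens out) := by unfold Spec_candidate_nodes; infer_instance

-- ===== CLAIM (what is proved, stated in full; the proofs are below) =====
def Claim_equal_candidate_nodes : Prop := ∀ (index : List (String × List String)) (tokens : List String), Dom_candidate_nodes index tokens → Spec_candidate_nodes index tokens (candidate_nodes index tokens)

-- ===== LEMMAS AND PROOFS =====

def hitsFrom (tok : String) : List (String × List String) → PySem.Set String → PySem.Set String
  | [], h => h
  | kv :: items, h =>
    hitsFrom tok items (if PySem.Str.isIn tok kv.1 then PySem.Set.union h kv.2 else h)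

theorem hitsFor_eq_hitsFrom' (tok : String) :
    ∀ (items : List (String × List String)) (s : PySem.Set String),
      items.foldl (fun hits kv => if PySem.Str.isIn tok kv.1 then PySem.Set.union hits kv.2 else hits) s
        = hitsFrom tok items s
  | [], s => rfl
  | kv :: items, s => by
      simp only [List.foldl_cons, hitsFrom]
      exact hitsFor_eq_hitsFrom' tok items _

theorem hitsFor_eq_hitsFrom (items : List (String × List String)) (tok : String) :
    hitsFor items tok = hitsFrom tok items PySem.Set.empty :=
  hitsFor_eq_hitsFrom' tok items PySem.Set.empty

theorem mem_hitsFrom (tok n : String) :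
    ∀ (items : List (String × List String)) (s : PySem.Set String),
      n ∈ hitsFrom tok items s ↔ n ∈ s ∨ ∃ kv ∈ items, PySem.Str.isIn tok kv.1 = true ∧ n ∈ kv.2
  | [], s => by simp [hitsFrom]
  | kv :: items, s => by
      by_cases h : PySem.Str.isIn tok kv.1 = true
      · simp only [hitsFrom, if_pos h]
        simp only [PySem.Str.isIn_eq] at h
        simp [mem_hitsFrom tok n items, PySem.Set.mem_union, h]
        tauto
      · simp only [hitsFrom, if_neg h]
        simp only [PySem.Str.isIn_eq] at h
        simp [mem_hitsFrom tok n items, h]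

theorem bKeysOf_eq_flat (items : List (String × List String)) :
    ∀ (d : PySem.Dict String (List String)),
      items.foldl (fun d kv => kv.2.foldl (fun d n => d.modify n [] (fun l => l ++ [kv.1])) d) d
        = (items.flatMap (fun kv => kv.2.map (fun m => (m, kv.1)))).foldl
            (fun d p => d.modify p.1 [] (fun l => l ++ [p.2])) d := by
  induction items with
  | nil => intro d; rfl
  | cons kv items ih => intro d; simp [List.foldl_append, ih, List.foldl_map]

theorem pred_eq (items : List (String × List String)) (tok n : String) :
    ((bKeysOf items).getD n []).any (fun k => PySem.Str.isIn tok k)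
      = PySem.Set.contains (hitsFor items tok) n := by
  rw [Bool.eq_iff_iff]
  rw [show bKeysOf items
    = (items.flatMap (fun kv => kv.2.map (fun m => (m, kv.1)))).foldl
        (fun d p => d.modify p.1 [] (fun l => l ++ [p.2])) PySem.Dict.empty
    from bKeysOf_eq_flat items PySem.Dict.empty]
  rw [PySem.Dict.getD_foldl_modify_append]
  simp [List.any_eq_true, hitsFor_eq_hitsFrom, mem_hitsFrom]
  constructor
  · rintro ⟨a, b, h1, h2, h3⟩
    exact ⟨a, b, h1, h3, h2⟩
  · rintro ⟨a, b, h1, h2, h3⟩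
    exact ⟨a, b, h1, h3, h2⟩

theorem filter_eq_inter (items : List (String × List String)) (tok : String)
    (c : PySem.Set String) :
    c.filter (fun n => ((bKeysOf items).getD n []).any (fun k => PySem.Str.isIn tok k))
      = PySem.Set.inter c (hitsFor items tok) := by
  show _ = c.filter (fun n => PySem.Set.contains (hitsFor items tok) n)
  simp only [pred_eq]

theorem inter_nil (t : PySem.Set String) : PySem.Set.inter ([] : PySem.Set String) t = [] := rfl

theorem foldl_inter_nil (items : List (String × List String)) :
    ∀ (ts : List String),
      ts.foldl (fun acc t => PySem.Set.inter acc (hitsFor items t)) ([] : PySem.Set String) = []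
  | [] => rfl
  | t :: ts => by
      simp only [List.foldl_cons, inter_nil]
      exact foldl_inter_nil items ts

-- A's early-exit loop computes the plain running intersection
theorem aLoop_some (items : List (String × List String)) :
    ∀ (ts : List String) (c : PySem.Set String),
      aLoop items ts (some c)
        = some (ts.foldl (fun acc t => PySem.Set.inter acc (hitsFor items t)) c)
  | [], c => rfl
  | t :: ts, c => by
      simp only [aLoop, List.foldl_cons]
      split
      · next hnil => rw [hnil, foldl_inter_nil items ts]
      · exact aLoop_some items ts _

theorem aLoop_none_cons (items : List (String × List String)) (t : String) (ts : List String) :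
    aLoop items (t :: ts) none
      = some (ts.foldl (fun acc t => PySem.Set.inter acc (hitsFor items t)) (hitsFor items t)) := by
  simp only [aLoop]
  split
  · next hnil => rw [hnil, foldl_inter_nil items ts]
  · exact aLoop_some items ts _

-- B's early-exit loop computes the plain running intersection too
theorem bLoop_eq (items : List (String × List String)) :
    ∀ (ts : List String) (c : PySem.Set String),
      bLoop (bKeysOf items) ts c
        = ts.foldl (fun acc t => PySem.Set.inter acc (hitsFor items t)) c
  | [], c => rfl
  | t :: ts, c => by
      simp only [bLoop, filter_eq_inter items t c, List.foldl_cons]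
      split
      · next hnil => rw [hnil, foldl_inter_nil items ts]
      · exact bLoop_eq items ts _

-- ===== VERDICT (by name: the statement is the Claim_ definition above) =====
theorem candidate_nodes_spec : Claim_equal_candidate_nodes := by
  intro index tokens _
  show candidate_nodes index tokens = candidate_nodes_alt index tokens
  unfold candidate_nodes candidate_nodes_alt
  by_cases hidx : index = []
  · simp [hidx]
  · simp only [hidx, ite_false]
    cases tokens with
    | nil => rfl
    | cons t0 ts =>
        rw [aLoop_none_cons]
        have hcand0 : ((PySem.Dict.ofList index).items.foldl
            (fun s kv => if PySem.Str.isIn t0 kv.1 then PySem.Set.update s kv.2 else s)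
            PySem.Set.empty)
            = hitsFor (PySem.Dict.ofList index).items t0 := rfl
        simp only [hcand0, bLoop_eq]
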